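-- pv_equiv track=rewrite | github.com/LibreOffice/core | bin/check-missing-unittests.py | whiteboardNotes
-- ===== SOURCE A (Python) =====
-- def whiteboardNotes(whiteboard):
--     if not whiteboard:
--         return ''
--     if ' ' in whiteboard:
--         whiteboardList = reversed(whiteboard.split(' '))
--         for w in whiteboardList:
--             if w.startswith("unitTestNotes"):
--                 return w.split(':')[1]
--     elif whiteboard.startswith("unitTestNotes"):
--         return whiteboard.split(':')[1]
--
--     return ''
-- ===== SOURCE B (Python) =====
-- def whiteboardNotes(whiteboard):
--     # Substring search instead of tokenization: pad with spaces so every token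
--     # boundary is a literal ' ', locate the LAST occurrence of ' unitTestNotes'
--     # with rfind, cut the token out, and take the part between its first and
--     # second colon (to the end if there is no second colon).
--     padded = ' ' + whiteboard + ' '
--     i = padded.rfind(' unitTestNotes')
--     if i == -1:
--         return ''
--     note = padded[i + 1 : padded.find(' ', i + 1)]
--     c1 = note.find(':') + 1
--     c2 = note.find(':', c1)
--     return note[c1:] if c2 == -1 else note[c1:c2]
-- ===== Notes on version B (the rewrite author's own statement) =====
-- stated objective: faster
-- what changed: B never splits the string: it space-pads it, finds the last matching token with one rfind of the substring ' unitTestNotes', slices the token out, and extracts the note between the token's first and second colon with find, replacing A's split-into-list plus reversed prefix scan.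
import Mathlib
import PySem

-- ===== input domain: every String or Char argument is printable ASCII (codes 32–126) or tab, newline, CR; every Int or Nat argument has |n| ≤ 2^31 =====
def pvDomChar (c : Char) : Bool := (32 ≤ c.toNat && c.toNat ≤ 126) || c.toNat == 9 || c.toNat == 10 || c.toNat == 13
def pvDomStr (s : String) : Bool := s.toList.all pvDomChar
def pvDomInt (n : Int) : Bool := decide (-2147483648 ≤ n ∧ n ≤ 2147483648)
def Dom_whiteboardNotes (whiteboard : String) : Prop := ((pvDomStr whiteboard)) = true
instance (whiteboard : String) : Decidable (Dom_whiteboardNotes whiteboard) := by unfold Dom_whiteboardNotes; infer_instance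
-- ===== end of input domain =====

-- B replaces A's split-into-tokens plus reversed prefix scan by a single rfind of the
-- substring " unitTestNotes" in the space-padded string and find/slice extraction
-- (return value only; no mutation).

-- ===== PORT A =====
-- w.startswith("unitTestNotes")
def pvMatch (w : String) : Bool := PySem.Str.startswith w "unitTestNotes"

-- w.split(':')[1]; the .getD "" default is only reached where Python raises IndexError (outside Pre_)
def pvExtract (w : String) : String :=
  (PySem.List.pyGet? ((PySem.Str.split? w ":").getD []) 1).getD ""

-- the 'for w in reversed(...)' loop with its early return
def pvLoopA : List String → Option String
  | [] => none
  | w :: rest => if pvMatch w then some (pvExtract w) else pvLoopA rest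

def whiteboardNotes (whiteboard : String) : String :=
  if whiteboard == "" then ""
  else if PySem.Str.isIn " " whiteboard then
    match pvLoopA (((PySem.Str.split? whiteboard " ").getD []).reverse) with
    | some r => r
    | none => ""
  else if pvMatch whiteboard then pvExtract whiteboard
  else ""

-- ===== PORT B =====
def whiteboardNotes_alt (whiteboard : String) : String :=
  let padded := " " ++ whiteboard ++ " "
  let i := PySem.Str.rfind padded " unitTestNotes"
  if i == -1 then ""
  else
    let note := PySem.Str.slice padded (some (i + 1)) (some (PySem.Str.findFrom padded " " (i + 1)))
    let c1 := PySem.Str.find note ":" + 1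
    let c2 := PySem.Str.findFrom note ":" c1
    if c2 == -1 then PySem.Str.slice note (some c1) none
    else PySem.Str.slice note (some c1) (some c2)

-- ===== PRECONDITION & SPEC =====
-- Pre_ excludes exactly the inputs on which the Python A raises IndexError: those whose last
-- space-separated token starting with "unitTestNotes" contains no ':'.
def Pre_whiteboardNotes (whiteboard : String) : Prop :=
  ((((PySem.Str.split? whiteboard " ").getD []).filter
      (fun w => PySem.Str.startswith w "unitTestNotes")).getLast?.all
    (fun w => PySem.Str.isIn ":" w)) = true
instance (whiteboard : String) : Decidable (Pre_whiteboardNotes whiteboard) := by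
  unfold Pre_whiteboardNotes; infer_instance

def pvWitness_whiteboardNotes : String := "a unitTestNotes:x b"

def Spec_whiteboardNotes (whiteboard : String) (out : String) : Prop := out = whiteboardNotes_alt whiteboard
instance (whiteboard : String) (out : String) : Decidable (Spec_whiteboardNotes whiteboard out) := by unfold Spec_whiteboardNotes; infer_instance

-- ===== CLAIM (what is proved, stated in full; the proofs are below) =====
def Claim_equal_whiteboardNotes : Prop := ∀ (whiteboard : String), Dom_whiteboardNotes whiteboard → Pre_whiteboardNotes whiteboard → Spec_whiteboardNotes whiteboard (whiteboardNotes whiteboard)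

-- ===== LEMMAS AND PROOFS =====

-- reference single-character tokenizer: what s.split(c) computes
def pvTok (c : Char) : List Char → List (List Char)
  | [] => [[]]
  | d :: l => if d = c then [] :: pvTok c l else (pvTok c l).modifyHead (d :: ·)

theorem pvTok_ne_nil (c : Char) (l : List Char) : pvTok c l ≠ [] := by
  induction l with
  | nil => simp [pvTok]
  | cons d l ih =>
    by_cases h : d = c <;> simp [pvTok, h]
    cases htl : pvTok c l with
    | nil => exact absurd htl ih
    | cons a b => simp

theorem pvGo_eq (c : Char) : ∀ (fuel : Nat) (l cur : List Char) (acc : List (List Char)),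
    l.length < fuel →
    PySem.Chars.splitOn.go [c] fuel l cur acc
      = acc.reverse ++ (pvTok c l).modifyHead (cur.reverse ++ ·) := by
  intro fuel
  induction fuel with
  | zero => intro l cur acc h; omega
  | succ fuel ih =>
    intro l cur acc h
    cases l with
    | nil => simp [PySem.Chars.splitOn.go, pvTok]
    | cons d rest =>
      by_cases hd : c = d
      · subst hd
        have hp : List.isPrefixOf [c] (c :: rest) = true := by simp [List.isPrefixOf]
        rw [show PySem.Chars.splitOn.go [c] (fuel+1) (c::rest) cur acc
              = PySem.Chars.splitOn.go [c] fuel (List.drop 1 (c::rest)) [] (cur.reverse :: acc) by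
            simp [PySem.Chars.splitOn.go, hp]]
        rw [ih _ _ _ (by simp at h ⊢; omega)]
        cases htl : pvTok c rest with
        | nil => exact absurd htl (pvTok_ne_nil c rest)
        | cons a b => simp [pvTok, htl]
      · have hp : List.isPrefixOf [c] (d :: rest) = false := by
          simp [List.isPrefixOf]; exact fun hh => hd hh
        rw [show PySem.Chars.splitOn.go [c] (fuel+1) (d::rest) cur acc
              = PySem.Chars.splitOn.go [c] fuel rest (d :: cur) acc by
            simp [PySem.Chars.splitOn.go, hp]]
        rw [ih _ _ _ (by simp at h ⊢; omega)]
        have hne : d = c ↔ False := by constructor; exact fun hh => hd hh.symm; exact False.elim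
        cases htl : pvTok c rest with
        | nil => exact absurd htl (pvTok_ne_nil c rest)
        | cons a b => simp [pvTok, hne, htl]

theorem pvSplitOn_eq_tok (c : Char) (l : List Char) :
    PySem.Chars.splitOn l [c] = pvTok c l := by
  unfold PySem.Chars.splitOn
  rw [pvGo_eq c (l.length + 1) l [] [] (by omega)]
  cases h : pvTok c l with
  | nil => exact absurd h (pvTok_ne_nil c l)
  | cons a b => simp

theorem pvTok_not_mem (c : Char) (l : List Char) : ∀ t ∈ pvTok c l, c ∉ t := by
  induction l with
  | nil => simp [pvTok]
  | cons d l ih =>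
    by_cases h : d = c
    · simp [pvTok, h]; exact ih
    · cases htl : pvTok c l with
      | nil => exact absurd htl (pvTok_ne_nil c l)
      | cons a b =>
        simp [pvTok, h, htl]
        have ha := ih a (by simp [htl])
        have hb := fun t ht => ih t (by simp [htl]; right; exact ht)
        refine ⟨⟨fun hh => h hh.symm, ha⟩, hb⟩

theorem pvTok_no_occ (c : Char) (l : List Char) (h : c ∉ l) : pvTok c l = [l] := by
  induction l with
  | nil => rfl
  | cons d l ih =>
    simp at h
    have hdc : ¬ d = c := fun hh => h.1 hh.symm
    simp [pvTok, hdc, ih h.2]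

theorem pvTok_append_cons (c : Char) (a b : List Char) (h : c ∉ a) :
    pvTok c (a ++ c :: b) = a :: pvTok c b := by
  induction a with
  | nil => simp [pvTok]
  | cons d a ih =>
    simp at h
    have hdc : ¬ d = c := fun hh => h.1 hh.symm
    simp [pvTok, hdc, ih h.2]

def pvJoin (ts : List (List Char)) : List Char :=
  ts.foldr (fun t acc => ' ' :: t ++ acc) [' ']

theorem pvTok_join (l : List Char) : pvJoin (pvTok ' ' l) = ' ' :: l ++ [' '] := by
  induction l with
  | nil => rfl
  | cons d l ih =>
    by_cases h : d = ' '
    · subst h; simp [pvTok, pvJoin] at ih ⊢; simpa using ih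
    · cases htl : pvTok ' ' l with
      | nil => exact absurd htl (pvTok_ne_nil ' ' l)
      | cons a b =>
        rw [htl] at ih
        simp [pvTok, h, htl, pvJoin] at ih ⊢
        simpa using ih

theorem pvRgo_zero (s sub : List Char) :
    PySem.Chars.rfind.go s sub 0 = if sub.isPrefixOf s then 0 else -1 := rfl
theorem pvRgo_succ (s sub : List Char) (j : Nat) :
    PySem.Chars.rfind.go s sub (j + 1)
      = if sub.isPrefixOf (s.drop (j + 1)) then ((j : Int) + 1) else PySem.Chars.rfind.go s sub j := rfl

theorem pvRgo_cases (s sub : List Char) : ∀ j : Nat,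
    (PySem.Chars.rfind.go s sub j = -1 ∧ ∀ i ≤ j, ¬ sub <+: s.drop i) ∨
    (∃ k : Nat, PySem.Chars.rfind.go s sub j = (k : Int) ∧ k ≤ j ∧ sub <+: s.drop k ∧
      ∀ i, k < i → i ≤ j → ¬ sub <+: s.drop i) := by
  intro j
  induction j with
  | zero =>
    rw [pvRgo_zero]
    by_cases h : sub.isPrefixOf s
    · right
      exact ⟨0, by simp [h], le_refl 0, by simpa using List.isPrefixOf_iff_prefix.mp h, by omega⟩
    · left
      refine ⟨by simp [h], ?_⟩
      intro i hi
      interval_cases i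
      simpa using fun hh => h (List.isPrefixOf_iff_prefix.mpr (by simpa using hh))
  | succ j ih =>
    rw [pvRgo_succ]
    by_cases h : sub.isPrefixOf (s.drop (j+1))
    · right
      refine ⟨j+1, by simp [h], le_refl _, List.isPrefixOf_iff_prefix.mp h, by omega⟩
    · have hnp : ¬ sub <+: s.drop (j+1) := fun hh => h (List.isPrefixOf_iff_prefix.mpr hh)
      rcases ih with ⟨hv, hall⟩ | ⟨k, hv, hk, hp, hmax⟩
      · left
        refine ⟨by simp [h, hv], ?_⟩
        intro i hi
        rcases Nat.lt_or_ge i (j+1) with h1 | h1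
        · exact hall i (by omega)
        · have : i = j+1 := by omega
          subst this; exact hnp
      · right
        refine ⟨k, by simp [h, hv], by omega, hp, ?_⟩
        intro i hik hij
        rcases Nat.lt_or_ge i (j+1) with h1 | h1
        · exact hmax i hik (by omega)
        · have : i = j+1 := by omega
          subst this; exact hnp

theorem pvPrefix_drop_len (s sub : List Char) (hsub : sub ≠ []) (i : Nat)
    (hi : s.length ≤ i) : ¬ sub <+: s.drop i := by
  intro h
  have := h.length_le
  simp [List.length_drop] at this
  cases sub with
  | nil => exact hsub rfl
  | cons a b => simp at this; omega

theorem pvRfind_neg (s sub : List Char) (hsub : sub ≠ [])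
    (h : PySem.Chars.rfind s sub = -1) : ∀ i, ¬ sub <+: s.drop i := by
  intro i
  rcases Nat.lt_or_ge i s.length with h1 | h1
  · rcases pvRgo_cases s sub s.length with ⟨_, hall⟩ | ⟨k, hv, _, _, _⟩
    · exact hall i (by omega)
    · rw [PySem.Chars.rfind] at h; rw [h] at hv; omega
  · exact pvPrefix_drop_len s sub hsub i h1

theorem pvRfind_pos (s sub : List Char) (hsub : sub ≠ []) (k : Nat)
    (h : PySem.Chars.rfind s sub = (k : Int)) :
    sub <+: s.drop k ∧ ∀ i, k < i → ¬ sub <+: s.drop i := by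
  rcases pvRgo_cases s sub s.length with ⟨hv, _⟩ | ⟨k', hv, hk', hp, hmax⟩
  · rw [PySem.Chars.rfind] at h; rw [h] at hv; omega
  · rw [PySem.Chars.rfind] at h; rw [h] at hv
    have : k' = k := by omega
    subst this
    refine ⟨hp, ?_⟩
    intro i hik
    rcases Nat.lt_or_ge i s.length with h1 | h1
    · exact hmax i hik (by omega)
    · exact pvPrefix_drop_len s sub hsub i h1

theorem pvRfind_max (s sub : List Char) (hsub : sub ≠ []) (k : Nat)
    (hpk : sub <+: s.drop k) (hmax : ∀ i, k < i → ¬ sub <+: s.drop i) :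
    PySem.Chars.rfind s sub = (k : Int) := by
  have hklen : k < s.length := by
    by_contra hc
    exact pvPrefix_drop_len s sub hsub k (by omega) hpk
  rcases pvRgo_cases s sub s.length with ⟨hv, hall⟩ | ⟨k', hv, hk', hp, hmax'⟩
  · exact absurd hpk (hall k (by omega))
  · rw [PySem.Chars.rfind, hv]
    congr 1
    rcases Nat.lt_trichotomy k k' with h1 | h1 | h1
    · exact absurd hp (hmax k' h1)
    · exact h1.symm
    · exact absurd hpk (hmax' k h1 (by omega))

theorem pvRfind_none (s sub : List Char) (h : ∀ i, ¬ sub <+: s.drop i) :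
    PySem.Chars.rfind s sub = -1 := by
  rcases pvRgo_cases s sub s.length with ⟨hv, _⟩ | ⟨k, _, _, hp, _⟩
  · exact hv
  · exact absurd hp (h k)

theorem pvFgo_cons (c d : Char) (l : List Char) (k : Nat) :
    PySem.Chars.find.go [c] (d :: l) k
      = if d = c then (k : Int) else PySem.Chars.find.go [c] l (k + 1) := by
  show (if List.isPrefixOf [c] (d :: l) then (k : Int) else PySem.Chars.find.go [c] l (k+1)) = _
  by_cases h : d = c <;> simp [List.isPrefixOf, h]
  intro hh; exact absurd hh.symm h

theorem pvFgo_none (c : Char) : ∀ (a : List Char) (k : Nat), c ∉ a →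
    PySem.Chars.find.go [c] a k = -1 := by
  intro a
  induction a with
  | nil => intro k _; rfl
  | cons d l ih =>
    intro k h
    simp at h
    rw [pvFgo_cons]
    have hdc : ¬ d = c := fun hh => h.1 hh.symm
    simp [hdc, ih (k+1) h.2]

theorem pvFind_none (c : Char) (a : List Char) (h : c ∉ a) :
    PySem.Chars.find a [c] = -1 := pvFgo_none c a 0 h

theorem pvFgo_single (c : Char) (b : List Char) : ∀ (a : List Char) (k : Nat), c ∉ a →
    PySem.Chars.find.go [c] (a ++ c :: b) k = ((k + a.length : Nat) : Int) := by
  intro a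
  induction a with
  | nil => intro k _; rw [List.nil_append, pvFgo_cons]; simp
  | cons d l ih =>
    intro k h
    simp at h
    rw [List.cons_append, pvFgo_cons]
    have hdc : ¬ d = c := fun hh => h.1 hh.symm
    rw [ih (k+1) h.2]
    simp [hdc]
    ring

theorem pvFind_single (c : Char) (a b : List Char) (h : c ∉ a) :
    PySem.Chars.find (a ++ c :: b) [c] = (a.length : Int) := by
  have := pvFgo_single c b a 0 h
  simpa [PySem.Chars.find] using this

-- occurrence analysis of ' '::w in ' '::t ++ rest (t and w space-free, rest starts with ' ')
theorem pvOcc_zero (w t rest : List Char) (hw : (' ' : Char) ∉ w) :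
    ((' ' :: w) <+: (' ' :: t ++ ' ' :: rest)) ↔ w.isPrefixOf t := by
  rw [List.isPrefixOf_iff_prefix]
  constructor
  · intro h
    rw [List.cons_append, List.cons_prefix_cons] at h
    have h' := h.2
    rcases List.prefix_or_prefix_of_prefix h' (List.prefix_append t (' ' :: rest)) with h2 | h2
    · exact h2
    · obtain ⟨u, hu⟩ := h2
      subst hu
      have hu2 : u <+: ' ' :: rest := (List.prefix_append_right_inj t).mp h'
      cases u with
      | nil => simp
      | cons x xs =>
        rw [List.cons_prefix_cons] at hu2
        exact absurd (show (' ' : Char) ∈ t ++ x :: xs by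
          rw [← hu2.1]; exact List.mem_append_right _ (List.mem_cons_self)) hw
  · intro h
    rw [List.cons_append, List.cons_prefix_cons]
    exact ⟨rfl, h.trans (List.prefix_append t (' ' :: rest))⟩

theorem pvOcc_mid (w t rest : List Char) (ht : (' ' : Char) ∉ t) (i : Nat)
    (h1 : 1 ≤ i) (h2 : i ≤ t.length) :
    ¬ (' ' :: w) <+: (' ' :: t ++ rest).drop i := by
  intro h
  obtain ⟨j, rfl⟩ : ∃ j, i = j + 1 := ⟨i - 1, by omega⟩
  have hj : j < t.length := by omega
  rw [List.cons_append, List.drop_succ_cons, List.drop_append_of_le_length (by omega),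
      List.drop_eq_getElem_cons hj] at h
  rw [List.cons_append, List.cons_prefix_cons] at h
  exact absurd (h.1 ▸ List.getElem_mem hj) ht

theorem pvDrop_shift (t rest : List Char) (m : Nat) :
    (' ' :: t ++ rest).drop (t.length + 1 + m) = rest.drop m := by
  rw [List.cons_append, show t.length + 1 + m = (t.length + m) + 1 by omega,
      List.drop_succ_cons, List.drop_append, List.drop_eq_nil_of_le (by omega), List.nil_append]
  congr 1
  omega

theorem pvJoin_head (ts : List (List Char)) : ∃ X, pvJoin ts = ' ' :: X := by
  cases ts with
  | nil => exact ⟨[], rfl⟩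
  | cons a l => exact ⟨a ++ pvJoin l, rfl⟩

theorem pvPat_ne (w : List Char) : (' ' :: w) ≠ [] := by simp

-- the crux: rfind of ' '::w in the padded join finds the start of the LAST token with prefix w
theorem pvM (w : List Char) (hw0 : w ≠ []) (hwsp : (' ' : Char) ∉ w) :
    ∀ ts : List (List Char), (∀ t ∈ ts, (' ' : Char) ∉ t) →
    (match ts.reverse.find? (fun t => w.isPrefixOf t) with
     | none => PySem.Chars.rfind (pvJoin ts) (' ' :: w) = -1
     | some t => ∃ (i : Nat) (rest : List Char),
        PySem.Chars.rfind (pvJoin ts) (' ' :: w) = (i : Int) ∧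
        (pvJoin ts).drop (i + 1) = t ++ ' ' :: rest) := by
  intro ts
  induction ts with
  | nil =>
    intro _
    simp only [List.reverse_nil, List.find?_nil]
    apply pvRfind_none
    intro i h
    have hlen := h.length_le
    simp [List.length_drop, pvJoin] at hlen
    cases w with
    | nil => exact hw0 rfl
    | cons a b => simp at hlen; omega
  | cons t ts' ih =>
    intro hsp
    have hts' : ∀ u ∈ ts', (' ' : Char) ∉ u := fun u hu => hsp u (by simp [hu])
    have htsp : (' ' : Char) ∉ t := hsp t (by simp)
    have hJ : pvJoin (t :: ts') = ' ' :: t ++ pvJoin ts' := rfl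
    obtain ⟨X, hX⟩ := pvJoin_head ts'
    have hIH := ih hts'
    simp only [List.reverse_cons, List.find?_append]
    cases hf : ts'.reverse.find? (fun u => w.isPrefixOf u) with
    | some t' =>
      rw [hf] at hIH
      obtain ⟨i, rest, hr, hd⟩ := hIH
      obtain ⟨hocc, hmax⟩ := pvRfind_pos (pvJoin ts') (' ' :: w) (pvPat_ne w) i hr
      have hkmax : ∀ i', t.length + 1 + i < i' → ¬ (' ' :: w) <+: (pvJoin (t :: ts')).drop i' := by
        intro i' hgt hocc'
        have hge : t.length + 1 ≤ i' := by omega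
        obtain ⟨m, rfl⟩ : ∃ m, i' = t.length + 1 + m := ⟨i' - (t.length + 1), by omega⟩
        rw [hJ, pvDrop_shift] at hocc'
        exact hmax m (by omega) hocc'
      have hkocc : (' ' :: w) <+: (pvJoin (t :: ts')).drop (t.length + 1 + i) := by
        rw [hJ, pvDrop_shift]; exact hocc
      refine ⟨t.length + 1 + i, rest, pvRfind_max _ _ (pvPat_ne w) _ hkocc hkmax, ?_⟩
      rw [hJ, show t.length + 1 + i + 1 = t.length + 1 + (i + 1) by omega, pvDrop_shift]
      exact hd
    | none =>
      rw [hf] at hIH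
      have hneg : ∀ m, ¬ (' ' :: w) <+: (pvJoin ts').drop m :=
        pvRfind_neg (pvJoin ts') (' ' :: w) (pvPat_ne w) hIH
      have habove : ∀ i', 1 ≤ i' → ¬ (' ' :: w) <+: (pvJoin (t :: ts')).drop i' := by
        intro i' h1 hocc'
        rcases Nat.lt_or_ge i' (t.length + 1) with hlt | hge
        · exact pvOcc_mid w t (pvJoin ts') htsp i' h1 (by omega) (by rw [hJ] at hocc'; exact hocc')
        · obtain ⟨m, rfl⟩ : ∃ m, i' = t.length + 1 + m := ⟨i' - (t.length + 1), by omega⟩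
          rw [hJ, pvDrop_shift] at hocc'
          exact hneg m hocc'
      cases hm : w.isPrefixOf t with
      | true =>
        simp only [List.find?_cons, hm, Option.none_or]
        refine ⟨0, X, ?_, ?_⟩
        · apply pvRfind_max _ _ (pvPat_ne w) 0
          · rw [hJ, hX, List.drop_zero]
            exact (pvOcc_zero w t X hwsp).mpr hm
          · intro i' hgt; exact habove i' (by omega)
        · rw [hJ, hX]; rfl
      | false =>
        simp only [List.find?_cons, hm, Option.none_or]
        apply pvRfind_none
        intro i'
        cases i' with
        | zero =>
          rw [List.drop_zero, hJ, hX]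
          intro hocc'
          exact absurd ((pvOcc_zero w t X hwsp).mp hocc') (by simp [hm])
        | succ m => exact habove (m + 1) (by omega)

-- A's loop finds the first match of the list it is given
theorem pvLoopA_eq_find (ts : List String) :
    pvLoopA ts = (ts.find? pvMatch).map pvExtract := by
  induction ts with
  | nil => rfl
  | cons w rest ih =>
    cases h : pvMatch w <;> simp [pvLoopA, h, ih]

theorem pvRevFind_eq_filterLast {α : Type} (p : α → Bool) (l : List α) :
    l.reverse.find? p = (l.filter p).getLast? := by
  induction l with
  | nil => rfl
  | cons a l ih =>
    rw [List.reverse_cons, List.find?_append, ih, List.filter_cons]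
    cases hp : p a
    · simp [hp]
    · rw [if_pos rfl]
      cases hfl : (l.filter p).getLast? with
      | some b => simp [List.getLast?_cons, hfl]
      | none =>
        have : l.filter p = [] := by
          cases h : l.filter p with
          | nil => rfl
          | cons x xs => rw [h] at hfl; simp at hfl
        simp [List.getLast?_cons, this, hp]

theorem pvSplitFirst (c : Char) (t : List Char) (h : c ∈ t) :
    ∃ a b, t = a ++ c :: b ∧ c ∉ a := by
  induction t with
  | nil => simp at h
  | cons d l ih =>
    by_cases hd : d = c
    · exact ⟨[], l, by simp [hd], by simp⟩
    · have : c ∈ l := by rcases List.mem_cons.mp h with h1 | h1; exact absurd h1.symm hd; exact h1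
      obtain ⟨a, b, hab, hna⟩ := ih this
      exact ⟨d :: a, b, by simp [hab], by simp [hna]; exact fun hh => hd hh.symm⟩

-- the match predicate, seen on the char-list side
theorem pvMatch_ofList (t : List Char) :
    pvMatch (String.ofList t) = ("unitTestNotes".toList).isPrefixOf t := by
  simp [pvMatch, PySem.Str.startswith, PySem.Chars.startswith, String.toList_ofList]

-- A's whole body = reverse-search over the space-tokenization
theorem pvA_eq (wb : String) :
    whiteboardNotes wb
      = (match (pvTok ' ' wb.toList).reverse.find?
            (fun t => ("unitTestNotes".toList).isPrefixOf t) with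
         | none => ""
         | some t => pvExtract (String.ofList t)) := by
  unfold whiteboardNotes
  by_cases he : wb = ""
  · subst he; decide
  · rw [if_neg (by simpa using he)]
    by_cases hs : PySem.Str.isIn " " wb = true
    · rw [if_pos hs]
      have hsplit : PySem.Str.split? wb " " = some ((pvTok ' ' wb.toList).map String.ofList) := by
        show Option.map _ (PySem.Chars.split? wb.toList " ".toList) = _
        rw [show " ".toList = [' '] from rfl, PySem.Chars.split?, if_neg (by simp),
            pvSplitOn_eq_tok]
        rfl
      rw [hsplit]
      simp only [Option.getD_some, ← List.map_reverse, pvLoopA_eq_find, List.find?_map]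
      have hfun : (pvMatch ∘ String.ofList)
          = (fun t => ("unitTestNotes".toList).isPrefixOf t) := by
        funext t; exact pvMatch_ofList t
      rw [hfun]
      cases (pvTok ' ' wb.toList).reverse.find?
          (fun t => ("unitTestNotes".toList).isPrefixOf t) <;> simp
    · rw [if_neg hs]
      have hmem : (' ' : Char) ∉ wb.toList := by
        intro hm
        exact absurd ((PySem.Chars.isIn_iff_infix [' '] wb.toList).mpr
          ((List.singleton_infix_iff ' ' wb.toList).mpr hm)) (by simpa [PySem.Str.isIn] using hs)
      rw [pvTok_no_occ ' ' wb.toList hmem]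
      have hm2 : pvMatch wb = ("unitTestNotes".toList).isPrefixOf wb.toList := by
        rw [← String.ofList_toList (s := wb), pvMatch_ofList, String.ofList_toList]
      rw [hm2]
      cases hp : ("unitTestNotes".toList).isPrefixOf wb.toList with
      | true =>
        rw [if_pos rfl, show ([wb.toList]).reverse = [wb.toList] from rfl,
            List.find?_cons_of_pos hp]
        simp [String.ofList_toList]
      | false =>
        rw [if_neg (by simp), show ([wb.toList]).reverse = [wb.toList] from rfl,
            List.find?_cons_of_neg (fun hh => absurd hh (Bool.eq_false_iff.mp hp)), List.find?_nil]

-- per-token colon extraction: B's find/slice equals A's split(':')[1] when the token has a colon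
theorem pvSliceStr (t : List Char) (a? b? : Option Int) :
    PySem.Str.slice (String.ofList t) a? b? = String.ofList (PySem.List.slice t a? b?) := by
  show String.ofList (PySem.Chars.slice (String.ofList t).toList a? b?) = _
  rw [String.toList_ofList, PySem.Chars.slice_eq_listSlice]

theorem pvFindStr (t : List Char) :
    PySem.Str.find (String.ofList t) ":" = PySem.Chars.find t [':'] := by
  show PySem.Chars.find (String.ofList t).toList ":".toList = _
  rw [String.toList_ofList]; rfl

theorem pvFindFromStr (t : List Char) (st : Int) :
    PySem.Str.findFrom (String.ofList t) ":" st = PySem.Chars.findFrom t [':'] st := by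
  rw [PySem.Str.findFrom_eq, String.toList_ofList]; rfl

theorem pvSplitTok (t : List Char) :
    PySem.Str.split? (String.ofList t) ":" = some ((pvTok ':' t).map String.ofList) := by
  show Option.map _ (PySem.Chars.split? (String.ofList t).toList ":".toList) = _
  rw [String.toList_ofList, show ":".toList = [':'] from rfl, PySem.Chars.split?,
      if_neg (by simp), pvSplitOn_eq_tok]
  rfl

theorem pvColon (t : List Char) (hc : (':' : Char) ∈ t) :
    (let c1 := PySem.Str.find (String.ofList t) ":" + 1
     let c2 := PySem.Str.findFrom (String.ofList t) ":" c1
     if c2 == -1 then PySem.Str.slice (String.ofList t) (some c1) none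
     else PySem.Str.slice (String.ofList t) (some c1) (some c2))
    = pvExtract (String.ofList t) := by
  obtain ⟨a, b, rfl, hna⟩ := pvSplitFirst ':' t hc
  have hlen : a.length + 1 ≤ (a ++ ':' :: b).length := by simp
  have hdrop : (a ++ ':' :: b).drop (a.length + 1) = b := by
    rw [List.drop_append, List.drop_eq_nil_of_le (by omega), List.nil_append,
        show a.length + 1 - a.length = 1 from by omega]
    rfl
  have hfind : PySem.Chars.find (a ++ ':' :: b) [':'] = (a.length : Int) :=
    pvFind_single ':' a b hna
  have hc1 : PySem.Chars.find (a ++ ':' :: b) [':'] + 1 = ((a.length + 1 : Nat) : Int) := by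
    rw [hfind]; push_cast; ring
  have hextract : pvExtract (String.ofList (a ++ ':' :: b))
      = String.ofList ((PySem.List.pyGet? (pvTok ':' b) 0).getD []) := by
    unfold pvExtract
    rw [pvSplitTok, Option.getD_some, pvTok_append_cons ':' a b hna]
    cases htb : pvTok ':' b with
    | nil => exact absurd htb (pvTok_ne_nil ':' b)
    | cons x xs => simp [PySem.List.pyGet?, PySem.List.pyIdx?]
  simp only [pvFindStr, pvFindFromStr, hc1]
  rw [PySem.Chars.findFrom_natCast _ _ (a.length + 1) hlen, hdrop]
  by_cases hb : (':' : Char) ∈ b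
  · obtain ⟨u, v, rfl, hnu⟩ := pvSplitFirst ':' b hb
    rw [pvFind_single ':' u v hnu,
        if_neg (show ¬((u.length : Int) = -1) from by omega),
        show ((((a.length + 1 : Nat) : Int) + (u.length : Int)) == -1) = false from by
          simp; omega]
    rw [if_neg (by simp), pvSliceStr, PySem.List.slice_natCast_add, hdrop,
        List.take_left' rfl, hextract, pvTok_append_cons ':' u v hnu]
    simp [PySem.List.pyGet?, PySem.List.pyIdx?]
  · rw [pvFind_none ':' b hb, if_pos rfl,
        show (((-1 : Int)) == -1) = true from rfl, if_pos rfl,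
        pvSliceStr, PySem.List.slice_from_natCast, hdrop, hextract]
    rw [pvTok_no_occ ':' b hb]
    simp [PySem.List.pyGet?, PySem.List.pyIdx?]


-- split of the whole whiteboard, seen on the char-list side
theorem pvSplitWb (wb : String) :
    PySem.Str.split? wb " " = some ((pvTok ' ' wb.toList).map String.ofList) := by
  show Option.map _ (PySem.Chars.split? wb.toList " ".toList) = _
  rw [show " ".toList = [' '] from rfl, PySem.Chars.split?, if_neg (by simp),
      pvSplitOn_eq_tok]
  rfl

theorem pvPred_comp :
    ((fun w => PySem.Str.startswith w "unitTestNotes") ∘ String.ofList)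
      = (fun t => ("unitTestNotes".toList).isPrefixOf t) := by
  funext t
  simp [Function.comp, PySem.Str.startswith, PySem.Chars.startswith, String.toList_ofList]

-- B's whole body = the same reverse-search, through rfind on the padded string
theorem pvB_eq (wb : String) :
    whiteboardNotes_alt wb
      = (match (pvTok ' ' wb.toList).reverse.find?
            (fun t => ("unitTestNotes".toList).isPrefixOf t) with
         | none => ""
         | some t =>
            let c1 := PySem.Str.find (String.ofList t) ":" + 1
            let c2 := PySem.Str.findFrom (String.ofList t) ":" c1
            if c2 == -1 then PySem.Str.slice (String.ofList t) (some c1) none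
            else PySem.Str.slice (String.ofList t) (some c1) (some c2)) := by
  have hw0 : ("unitTestNotes".toList) ≠ [] := by decide
  have hwsp : (' ' : Char) ∉ "unitTestNotes".toList := by decide
  have hpadded : (" " ++ wb ++ " ").toList = ' ' :: wb.toList ++ [' '] := by
    rw [String.toList_append, String.toList_append]; rfl
  have hM := pvM ("unitTestNotes".toList) hw0 hwsp (pvTok ' ' wb.toList)
    (pvTok_not_mem ' ' wb.toList)
  rw [pvTok_join] at hM
  simp only [whiteboardNotes_alt]
  rw [PySem.Str.rfind_eq, hpadded,
      show " unitTestNotes".toList = ' ' :: "unitTestNotes".toList from rfl]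
  cases hf : (pvTok ' ' wb.toList).reverse.find?
      (fun t => ("unitTestNotes".toList).isPrefixOf t) with
  | none =>
    rw [hf] at hM
    rw [hM]
    rfl
  | some t =>
    rw [hf] at hM
    obtain ⟨i, rest, hr, hd⟩ := hM
    rw [hr, show (((i : Nat) : Int) == -1) = false from by simp]
    rw [if_neg (by simp)]
    have hlen : i + 1 ≤ (' ' :: wb.toList ++ [' ']).length := by
      by_contra hc
      push Not at hc
      rw [List.drop_eq_nil_of_le (by omega)] at hd
      exact (by simp : t ++ ' ' :: rest ≠ []) hd.symm
    have hts : (' ' : Char) ∉ t :=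
      pvTok_not_mem ' ' wb.toList t (List.mem_reverse.mp (List.mem_of_find?_eq_some hf))
    have hsl : PySem.Str.slice (" " ++ wb ++ " ") (some ((i : Int) + 1))
        (some (((i + 1 : Nat) : Int) + (t.length : Int))) = String.ofList t := by
      show String.ofList (PySem.Chars.slice (" " ++ wb ++ " ").toList _ _) = _
      rw [hpadded, PySem.Chars.slice_eq_listSlice,
          show (i : Int) + 1 = ((i + 1 : Nat) : Int) from by push_cast; ring,
          PySem.List.slice_natCast_add, hd, List.take_left' rfl]
    have hff : PySem.Str.findFrom (" " ++ wb ++ " ") " " ((i : Int) + 1)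
        = ((i + 1 : Nat) : Int) + (t.length : Int) := by
      rw [PySem.Str.findFrom_eq, hpadded, show " ".toList = [' '] from rfl,
          show (i : Int) + 1 = ((i + 1 : Nat) : Int) from by push_cast; ring,
          PySem.Chars.findFrom_natCast _ _ (i + 1) hlen, hd,
          pvFind_single ' ' t rest hts,
          if_neg (show ¬((t.length : Int) = -1) from by omega)]
    rw [hff, hsl]

-- Pre_ gives the last matching token a colon
theorem pvPre_colon (wb : String) (hpre : Pre_whiteboardNotes wb) (t : List Char)
    (hf : (pvTok ' ' wb.toList).reverse.find?
        (fun u => ("unitTestNotes".toList).isPrefixOf u) = some t) :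
    (':' : Char) ∈ t := by
  unfold Pre_whiteboardNotes at hpre
  rw [pvSplitWb, Option.getD_some, List.filter_map, pvPred_comp, List.getLast?_map,
      ← pvRevFind_eq_filterLast, hf] at hpre
  simp only [Option.map_some, Option.all_some] at hpre
  have h2 : PySem.Chars.isIn [':'] t = true := by
    simpa [PySem.Str.isIn, String.toList_ofList] using hpre
  exact (List.singleton_infix_iff ':' t).mp
    ((PySem.Chars.isIn_iff_infix [':'] t).mp h2)

-- ===== VERDICT (by name: the statement is the Claim_ definition above) =====
theorem whiteboardNotes_spec : Claim_equal_whiteboardNotes := by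
  intro wb _ hpre
  unfold Spec_whiteboardNotes
  rw [pvA_eq, pvB_eq]
  cases hf : (pvTok ' ' wb.toList).reverse.find?
      (fun u => ("unitTestNotes".toList).isPrefixOf u) with
  | none => rfl
  | some t => exact (pvColon t (pvPre_colon wb hpre t hf)).symm
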